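-- pv_equiv track=rewrite | github.com/ACA-Lab/ViTframe | build/lib/timesformer/datasets/aligned_sampler.py | calc_batch_jumps
-- ===== SOURCE A (Python) =====
-- import math
--
-- def calc_batch_jumps(videos_info_arr, scale_factor, reverse=True):
--     batch_steps_idx = []
--     current_batch_width = math.inf if reverse else 0
--     for idx, info in enumerate(videos_info_arr):
--         if (reverse and len(info[3]) < current_batch_width) or (not reverse and len(info[3]) > current_batch_width):
--             current_batch_width = len(info[3])
--             batch_steps_idx.append(idx * scale_factor)  # magnify
--     return batch_steps_idx
-- ===== SOURCE B (Python) =====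
-- def calc_batch_jumps(videos_info_arr, scale_factor, reverse=True):
--     widths = [len(info[3]) for info in videos_info_arr]
--
--     def beats_all_prior(i):
--         w = widths[i]
--         if reverse:
--             return all(p > w for p in widths[:i])
--         return w > 0 and all(p < w for p in widths[:i])
--
--     return [i * scale_factor for i in range(len(widths)) if beats_all_prior(i)]
-- ===== Notes on version B (the rewrite author's own statement) =====
-- stated objective: alternative
-- what changed: Replaces A's stateful single-pass running-extreme scan by a stateless nested-scan record test: index i is emitted iff its width strictly beats every earlier width (and is > 0 when not reverse).
import Mathlib
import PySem

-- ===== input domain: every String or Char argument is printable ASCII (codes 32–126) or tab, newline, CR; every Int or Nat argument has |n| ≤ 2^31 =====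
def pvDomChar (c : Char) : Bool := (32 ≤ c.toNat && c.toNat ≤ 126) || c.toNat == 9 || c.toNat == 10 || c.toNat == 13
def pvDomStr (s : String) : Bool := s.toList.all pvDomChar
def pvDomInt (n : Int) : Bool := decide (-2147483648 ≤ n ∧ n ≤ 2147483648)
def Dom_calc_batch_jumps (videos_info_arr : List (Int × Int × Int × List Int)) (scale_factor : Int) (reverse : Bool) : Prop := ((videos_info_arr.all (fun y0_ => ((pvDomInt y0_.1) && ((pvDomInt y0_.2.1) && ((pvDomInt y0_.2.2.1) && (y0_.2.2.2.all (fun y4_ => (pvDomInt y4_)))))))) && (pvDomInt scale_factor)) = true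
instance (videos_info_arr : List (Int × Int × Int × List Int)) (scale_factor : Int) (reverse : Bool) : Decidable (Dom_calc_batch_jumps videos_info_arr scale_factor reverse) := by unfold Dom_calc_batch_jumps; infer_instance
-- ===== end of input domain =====

-- B replaces A's stateful running-extreme scan by a stateless nested-scan record test
-- (index i is emitted iff its width strictly beats every earlier width); objective: alternative.

-- ===== PORT A =====
-- A's current_batch_width starts as math.inf (reverse) or 0; Option Int with none = math.inf
-- represents it exactly (none only arises as the initial value when reverse).
-- pvCmpA is A's loop condition: (reverse and w < cur) or (not reverse and w > cur).
def pvCmpA (rev : Bool) (w : Int) (cur : Option Int) : Bool :=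
  if rev then (match cur with | none => true | some c => decide (w < c))
  else (match cur with | none => false | some c => decide (w > c))

def calc_batch_jumps (videos_info_arr : List (Int × Int × Int × List Int)) (scale_factor : Int) (reverse : Bool) : List Int :=
  (videos_info_arr.zipIdx.foldl
    (fun (st : List Int × Option Int) (p : (Int × Int × Int × List Int) × Nat) =>
      let w : Int := (p.1.2.2.2.length : Int)
      if pvCmpA reverse w st.2 then (st.1 ++ [((p.2 : Int)) * scale_factor], some w) else st)
    ([], if reverse then none else some 0)).1

-- ===== PORT B =====
-- pvBeats is Source B's beats_all_prior(i): widths[i] strictly beats all of widths[:i]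
-- (and is > 0 when not reverse).
def pvBeats (rev : Bool) (widths : List Int) (i : Nat) : Bool :=
  let w := widths.getD i 0
  if rev then (widths.take i).all (fun p => decide (w < p))
  else decide (0 < w) && (widths.take i).all (fun p => decide (p < w))

def calc_batch_jumps_alt (videos_info_arr : List (Int × Int × Int × List Int)) (scale_factor : Int) (reverse : Bool) : List Int :=
  let widths := videos_info_arr.map (fun info => (info.2.2.2.length : Int))
  (List.range widths.length).filterMap
    (fun i => if pvBeats reverse widths i then some ((i : Int) * scale_factor) else none)

-- ===== PRECONDITION & SPEC =====
def Spec_calc_batch_jumps (videos_info_arr : List (Int × Int × Int × List Int)) (scale_factor : Int) (reverse : Bool) (out : List Int) : Prop := out = calc_batch_jumps_alt videos_info_arr scale_factor reverse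
instance (videos_info_arr : List (Int × Int × Int × List Int)) (scale_factor : Int) (reverse : Bool) (out : List Int) : Decidable (Spec_calc_batch_jumps videos_info_arr scale_factor reverse out) := by unfold Spec_calc_batch_jumps; infer_instance

-- ===== CLAIM (what is proved, stated in full; the proofs are below) =====
def Claim_equal_calc_batch_jumps : Prop := ∀ (videos_info_arr : List (Int × Int × Int × List Int)) (scale_factor : Int) (reverse : Bool), Dom_calc_batch_jumps videos_info_arr scale_factor reverse → Spec_calc_batch_jumps videos_info_arr scale_factor reverse (calc_batch_jumps videos_info_arr scale_factor reverse)

-- ===== LEMMAS AND PROOFS =====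

-- the condition "w strictly beats every width in pre" shared by both characterisations
def pvCond (rev : Bool) (w : Int) (pre : List Int) : Bool :=
  if rev then pre.all (fun p => decide (w < p))
  else decide (0 < w) && pre.all (fun p => decide (p < w))

-- reference function: record indices over the suffix, with processed prefix pre
def pvRec (rev : Bool) (sf : Int) (pre : List Int) : List Int → List Int
  | [] => []
  | w :: ws =>
    if pvCond rev w pre then ((pre.length : Int) * sf) :: pvRec rev sf (pre ++ [w]) ws
    else pvRec rev sf (pre ++ [w]) ws

-- A's state update step (what "cur := w on hit, keep otherwise" amounts to as a fold)
def pvStep (rev : Bool) (c : Option Int) (w : Int) : Option Int :=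
  if pvCmpA rev w c then some w else c

def pvCurOf (rev : Bool) (pre : List Int) : Option Int :=
  pre.foldl (pvStep rev) (if rev then none else some 0)

lemma pvCmp_foldl_true (w : Int) :
    ∀ (pre : List Int) (c : Option Int),
      pvCmpA true w (pre.foldl (pvStep true) c)
        = (pvCmpA true w c && pre.all (fun p => decide (w < p))) := by
  intro pre
  induction pre with
  | nil => intro c; simp
  | cons x pre ih =>
    intro c
    simp only [List.foldl_cons, List.all_cons, ih]
    have hhead : pvCmpA true w (pvStep true c x) = (pvCmpA true w c && decide (w < x)) := by
      cases c <;> simp [pvStep, pvCmpA] <;> split_ifs <;>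
        (rw [Bool.eq_iff_iff]; simp; omega)
    rw [hhead, Bool.and_assoc]

lemma pvCmp_foldl_false (w : Int) :
    ∀ (pre : List Int) (m : Int),
      pvCmpA false w (pre.foldl (pvStep false) (some m))
        = (decide (m < w) && pre.all (fun p => decide (p < w))) := by
  intro pre
  induction pre with
  | nil => intro m; simp [pvCmpA]
  | cons x pre ih =>
    intro m
    simp only [List.foldl_cons, List.all_cons]
    have hstep : pvStep false (some m) x = some (if m < x then x else m) := by
      simp [pvStep, pvCmpA]; split_ifs <;> rfl
    rw [hstep, ih]
    have hhead : decide ((if m < x then x else m) < w) = (decide (m < w) && decide (x < w)) := by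
      split_ifs <;> (rw [Bool.eq_iff_iff]; simp; omega)
    rw [hhead, Bool.and_assoc]

lemma pvCmp_curOf (rev : Bool) (w : Int) (pre : List Int) :
    pvCmpA rev w (pvCurOf rev pre) = pvCond rev w pre := by
  cases rev
  · simpa [pvCurOf, pvCond] using pvCmp_foldl_false w pre 0
  · simpa [pvCurOf, pvCond, pvCmpA] using pvCmp_foldl_true w pre none

lemma pvCurOf_append (rev : Bool) (pre : List Int) (w : Int) :
    pvCurOf rev (pre ++ [w]) = pvStep rev (pvCurOf rev pre) w := by
  simp [pvCurOf, List.foldl_append]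

-- A's fold equals pvRec
lemma loopA_eq (rev : Bool) (sf : Int) :
    ∀ (v : List (Int × Int × Int × List Int)) (pre : List Int) (acc : List Int),
    (List.foldl
      (fun (st : List Int × Option Int) (p : (Int × Int × Int × List Int) × Nat) =>
        if pvCmpA rev ((p.1.2.2.2.length : Int)) st.2 then
          (st.1 ++ [((p.2 : Int)) * sf], some ((p.1.2.2.2.length : Int))) else st)
      (acc, pvCurOf rev pre) (v.zipIdx pre.length)).1
    = acc ++ pvRec rev sf pre (v.map (fun info => (info.2.2.2.length : Int))) := by
  intro v
  induction v with
  | nil => intro pre acc; simp [pvRec]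
  | cons x v ih =>
    intro pre acc
    by_cases hc : pvCond rev ((x.2.2.2.length : Int)) pre = true
    · have hcur : pvCurOf rev (pre ++ [((x.2.2.2.length : Int))]) = some ((x.2.2.2.length : Int)) := by
        rw [pvCurOf_append]; simp [pvStep, pvCmp_curOf, hc]
      simp only [List.zipIdx_cons, List.foldl_cons, List.map_cons]
      rw [pvCmp_curOf, hc]
      simp only [if_true]
      have := ih (pre ++ [((x.2.2.2.length : Int))]) (acc ++ [(pre.length : Int) * sf])
      simp only [List.length_append, List.length_cons, List.length_nil, hcur] at this
      simpa [pvRec, hc, List.append_assoc] using this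
    · have hc' : pvCond rev ((x.2.2.2.length : Int)) pre = false := by simpa using hc
      have hcur : pvCurOf rev (pre ++ [((x.2.2.2.length : Int))]) = pvCurOf rev pre := by
        rw [pvCurOf_append]; simp [pvStep, pvCmp_curOf, hc']
      simp only [List.zipIdx_cons, List.foldl_cons, List.map_cons]
      rw [pvCmp_curOf, hc']
      simp only [Bool.false_eq_true, if_false]
      have := ih (pre ++ [((x.2.2.2.length : Int))]) acc
      simp only [List.length_append, List.length_cons, List.length_nil, hcur] at this
      simpa [pvRec, hc', List.append_assoc] using this

-- B's range/filterMap equals pvRec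
lemma loopB_eq (rev : Bool) (sf : Int) :
    ∀ (suf pre : List Int),
    (List.range' pre.length suf.length).filterMap
      (fun i => if pvBeats rev (pre ++ suf) i then some ((i : Int) * sf) else none)
    = pvRec rev sf pre suf := by
  intro suf
  induction suf with
  | nil => intro pre; simp [pvRec]
  | cons w ws ih =>
    intro pre
    have htake : (pre ++ w :: ws).take pre.length = pre := by
      simpa using List.take_left pre (w :: ws)
    have hbeats : pvBeats rev (pre ++ w :: ws) pre.length = pvCond rev w pre := by
      simp [pvBeats, pvCond, htake]
    have hthis := ih (pre ++ [w])
    simp only [List.length_append, List.length_cons, List.length_nil, List.append_assoc,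
      List.cons_append, List.nil_append] at hthis
    simp only [List.length_cons, List.range'_succ, List.filterMap_cons, hbeats]
    cases hc : pvCond rev w pre
    · simp only [pvRec, hc, Bool.false_eq_true, if_false]
      exact hthis
    · simp only [pvRec, hc, if_true]
      rw [hthis]

-- ===== VERDICT (by name: the statement is the Claim_ definition above) =====
theorem calc_batch_jumps_spec : Claim_equal_calc_batch_jumps := by
  intro v sf rev _
  unfold Spec_calc_batch_jumps
  have hA := loopA_eq rev sf v [] []
  have hB := loopB_eq rev sf (v.map (fun info => (info.2.2.2.length : Int))) []
  simp only [List.length_nil, List.nil_append] at hA hB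
  simp only [calc_batch_jumps, calc_batch_jumps_alt, List.range_eq_range']
  have h0 : (if rev = true then none else (some 0 : Option Int)) = pvCurOf rev [] := by
    simp [pvCurOf]
  rw [h0, hA]
  exact hB.symm
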